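-- pv_equiv track=rewrite | github.com/kristomu/voting-scripts | linear_programming/generators/lpgen.py | def_condorcet_matrix
-- ===== SOURCE A (Python) =====
-- import itertools
--
-- def T_generate_permutations_with_order(item_set, order):
-- 	if len(item_set) > 5:
-- 		raise ValueError("Too many items")
--
-- 	# Generate all permutations of the item set
-- 	all_permutations = list(itertools.permutations(item_set))
--
-- 	# Get the subset of items in the specified order
-- 	ordered_subset = [perm for perm in all_permutations if \
-- 		tuple(order) == tuple(item for item in perm if item in order)]
--
-- 	return ordered_subset
--
-- def cname(idx):
-- 	return chr(ord('A') + idx)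
--
-- def tuple_to_var_name(tuple):
-- 	return "".join([cname(idx) for idx in tuple])
--
-- DEF_REAL = 2
--
-- def pairbeats(election_name, incumbent, challenger, numcands):
-- 	# Get every tuple contributing to the pairwise defeat strength of the
-- 	# incumbent over the challenger.
-- 	item_set = range(numcands)
-- 	order = [incumbent, challenger]
--
-- 	perms_in_order = T_generate_permutations_with_order(item_set, order)
--
-- 	variable_name = "%s_%sb%s" % (election_name,
-- 		cname(incumbent), cname(challenger))
-- 	constraint_type = "="
-- 	rhs = " + ".join([election_name + "_" + tuple_to_var_name(perm) \
-- 			for perm in perms_in_order])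
--
-- 	return (DEF_REAL, variable_name, constraint_type, rhs)
--
-- def def_condorcet_matrix(election_name, numcands):
-- 	condmat = []
--
-- 	for i in range(numcands):
-- 		for j in range(numcands):
-- 			if i == j:
-- 				continue
--
-- 			condmat.append(pairbeats(election_name, i, j, numcands))
--
-- 	return condmat
-- ===== SOURCE B (Python) =====
-- import itertools
--
-- def _ordered_pairs(seq):
--     # all pairs (seq[a], seq[b]) with a < b, recursively on the structure
--     if not seq:
--         return []
--     head, rest = seq[0], seq[1:]
--     return [(head, y) for y in rest] + _ordered_pairs(rest)
--
-- def def_condorcet_matrix(election_name, numcands):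
--     if numcands > 5:
--         raise ValueError("Too many items")
--     perms = list(itertools.permutations(range(numcands)))
--     # one pass over all permutations: bucket each perm under every ordered pair
--     # (i, j) where i precedes j in that perm, preserving emission order
--     buckets = {}
--     for perm in perms:
--         for key in _ordered_pairs(perm):
--             buckets[key] = buckets.get(key, []) + [perm]
--     out = []
--     for i in range(numcands):
--         for j in range(numcands):
--             if i == j:
--                 continue
--             rhs = " + ".join(election_name + "_" + "".join(chr(ord('A') + c) for c in perm)
--                              for perm in buckets.get((i, j), []))
--             out.append((2, "%s_%sb%s" % (election_name, chr(ord('A') + i), chr(ord('A') + j)), "=", rhs))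
--     return out
-- ===== Notes on version B (the rewrite author's own statement) =====
-- stated objective: alternative
-- what changed: Instead of re-generating and re-filtering all n! permutations for every ordered pair (i,j), B generates the permutations once and buckets each permutation under every ordered pair it exhibits in a single pass, then builds each constraint row by a dictionary lookup.
import Mathlib
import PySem

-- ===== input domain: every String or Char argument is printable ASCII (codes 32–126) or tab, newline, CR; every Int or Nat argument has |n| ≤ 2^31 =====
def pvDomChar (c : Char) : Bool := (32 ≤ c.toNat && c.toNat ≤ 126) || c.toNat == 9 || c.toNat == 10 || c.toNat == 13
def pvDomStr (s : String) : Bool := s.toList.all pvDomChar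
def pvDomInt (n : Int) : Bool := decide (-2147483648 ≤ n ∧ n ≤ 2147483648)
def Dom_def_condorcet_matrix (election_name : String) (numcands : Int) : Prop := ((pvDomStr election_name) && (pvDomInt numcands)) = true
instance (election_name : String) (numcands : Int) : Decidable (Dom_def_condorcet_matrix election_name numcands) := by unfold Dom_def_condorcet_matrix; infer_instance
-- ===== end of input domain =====

-- B replaces A's per-(i,j) re-filtering of all permutations by ONE pass that buckets
-- every permutation under each ordered pair it exhibits (objective: alternative decomposition; one bucketing pass replaces per-pair re-filtering).

-- ===== PORT A =====
-- cname(idx) = chr(ord('A') + idx); exact for the nonnegative idx this program uses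
def cnameA (idx : Int) : String := String.ofList [Char.ofNat (65 + idx.toNat)]

def tupleToVarNameA (t : List Int) : String := PySem.Str.join "" (t.map cnameA)

-- Python raises ValueError when len(item_set) > 5; Pre_ excludes exactly those inputs
def tGeneratePermutationsWithOrder (item_set : List Int) (order : List Int) : List (List Int) :=
  let all_permutations := PySem.List.permutations item_set item_set.length
  all_permutations.filter (fun perm => order == perm.filter (fun item => order.contains item))

def pairbeatsA (election_name : String) (incumbent challenger numcands : Int) :
    Int × String × String × String :=
  let item_set := PySem.List.pyRange 0 numcands 1
  let order := [incumbent, challenger]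
  let perms_in_order := tGeneratePermutationsWithOrder item_set order
  let variable_name := election_name ++ "_" ++ cnameA incumbent ++ "b" ++ cnameA challenger
  let rhs := PySem.Str.join " + "
      (perms_in_order.map (fun perm => election_name ++ "_" ++ tupleToVarNameA perm))
  (2, variable_name, "=", rhs)

def def_condorcet_matrix (election_name : String) (numcands : Int) :
    List (Int × String × String × String) :=
  (PySem.List.pyRange 0 numcands 1).foldl (fun condmat i =>
    (PySem.List.pyRange 0 numcands 1).foldl (fun condmat j =>
      if i == j then condmat
      else condmat ++ [pairbeatsA election_name i j numcands]) condmat) []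

-- ===== PORT B =====
def cnameB (idx : Int) : String := String.ofList [Char.ofNat (65 + idx.toNat)]

def orderedPairsB : List Int → List (Int × Int)
  | [] => []
  | x :: rest => rest.map (fun y => (x, y)) ++ orderedPairsB rest

def bucketsB (numcands : Int) : PySem.Dict (Int × Int) (List (List Int)) :=
  (PySem.List.permutations (PySem.List.pyRange 0 numcands 1)
      (PySem.List.pyRange 0 numcands 1).length).foldl
    (fun d perm => (orderedPairsB perm).foldl
      (fun d key => d.modify key [] (fun l => l ++ [perm])) d)
    PySem.Dict.empty

def def_condorcet_matrix_alt (election_name : String) (numcands : Int) :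
    List (Int × String × String × String) :=
  let buckets := bucketsB numcands
  (PySem.List.pyRange 0 numcands 1).foldl (fun out i =>
    (PySem.List.pyRange 0 numcands 1).foldl (fun out j =>
      if i == j then out
      else out ++ [(2, election_name ++ "_" ++ cnameB i ++ "b" ++ cnameB j, "=",
        PySem.Str.join " + " ((buckets.getD (i, j) []).map
          (fun perm => election_name ++ "_" ++ PySem.Str.join "" (perm.map cnameB))))]) out) []

-- ===== PRECONDITION & SPEC =====
-- Python A raises ValueError("Too many items") exactly when numcands > 5
def Pre_def_condorcet_matrix (election_name : String) (numcands : Int) : Prop := numcands ≤ 5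
instance (election_name : String) (numcands : Int) : Decidable (Pre_def_condorcet_matrix election_name numcands) := by unfold Pre_def_condorcet_matrix; infer_instance

def pvWitness_def_condorcet_matrix : String × Int := ("e1", 3)

def Spec_def_condorcet_matrix (election_name : String) (numcands : Int) (out : List (Int × String × String × String)) : Prop := out = def_condorcet_matrix_alt election_name numcands
instance (election_name : String) (numcands : Int) (out : List (Int × String × String × String)) : Decidable (Spec_def_condorcet_matrix election_name numcands out) := by unfold Spec_def_condorcet_matrix; infer_instance

-- ===== CLAIM (what is proved, stated in full; the proofs are below) =====
def Claim_equal_def_condorcet_matrix : Prop := ∀ (election_name : String) (numcands : Int), Dom_def_condorcet_matrix election_name numcands → Pre_def_condorcet_matrix election_name numcands → Spec_def_condorcet_matrix election_name numcands (def_condorcet_matrix election_name numcands)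

-- ===== LEMMAS AND PROOFS =====

lemma filter_beq_nodup {α : Type} [BEq α] [LawfulBEq α] [DecidableEq α] (l : List α) (h : l.Nodup) (b : α) :
    l.filter (· == b) = if b ∈ l then [b] else [] := by
  induction l with
  | nil => simp
  | cons x xs ih =>
    simp only [List.nodup_cons] at h
    rw [List.filter_cons]
    by_cases hx : x = b
    · subst hx
      have : xs.filter (· == x) = [] := by
        rw [List.filter_eq_nil_iff]; intro a ha; simp only [beq_iff_eq]
        rintro rfl; exact h.1 ha
      simp [this]
    · have hxb : (x == b) = false := by simpa using hx
      rw [hxb]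
      simp only [Bool.false_eq_true, if_false, ih h.2, List.mem_cons]
      by_cases hb : b ∈ xs
      · simp [hb]
      · simp [hb, Ne.symm hx]

lemma mem_orderedPairs (a b : Int) (l : List Int) :
    (a, b) ∈ orderedPairsB l ↔ [a, b].Sublist l := by
  induction l with
  | nil => simp [orderedPairsB]
  | cons x rest ih =>
    simp only [orderedPairsB, List.mem_append]
    rw [List.sublist_cons_iff]
    constructor
    · rintro (hmap | h)
      · obtain ⟨y, hy, heq⟩ := List.mem_map.mp hmap
        injection heq with h1 h2
        subst h1; subst h2
        exact Or.inr ⟨[y], rfl, List.singleton_sublist.mpr hy⟩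
      · exact Or.inl (ih.mp h)
    · rintro (h | ⟨r, hr, hsub⟩)
      · exact Or.inr (ih.mpr h)
      · injection hr with h1 h2
        subst h1; subst h2
        exact Or.inl (List.mem_map.mpr ⟨b, List.singleton_sublist.mp hsub, rfl⟩)

lemma fst_mem_of_mem_orderedPairs (p : Int × Int) (l : List Int)
    (h : p ∈ orderedPairsB l) : p.1 ∈ l := by
  obtain ⟨a, b⟩ := p
  exact ((mem_orderedPairs a b l).mp h).subset (by simp)

lemma nodup_orderedPairs (l : List Int) (h : l.Nodup) : (orderedPairsB l).Nodup := by
  induction l with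
  | nil => simp [orderedPairsB]
  | cons x rest ih =>
    simp only [List.nodup_cons] at h
    refine List.Nodup.append ?_ (ih h.2) ?_
    · exact h.2.map (fun y z hyz => by simpa using congrArg Prod.snd hyz)
    · intro p hp hp'
      have h1 : p.1 = x := by
        obtain ⟨y, _, rfl⟩ := List.mem_map.mp hp
        rfl
      exact h.1 (h1 ▸ fst_mem_of_mem_orderedPairs p rest hp')

lemma foldl_nested_eq_flat (l : List (List Int)) (d : PySem.Dict (Int × Int) (List (List Int))) :
    l.foldl (fun d perm => (orderedPairsB perm).foldl
        (fun d key => d.modify key [] (fun v => v ++ [perm])) d) d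
      = (l.flatMap (fun perm => (orderedPairsB perm).map (fun k => (k, perm)))).foldl
          (fun d p => d.modify p.1 [] (fun v => v ++ [p.2])) d := by
  induction l generalizing d with
  | nil => rfl
  | cons perm rest ih =>
    simp only [List.foldl_cons, List.flatMap_cons, List.foldl_append, List.foldl_map]
    exact ih _

lemma flat_filter_map (c : Int × Int) (l : List (List Int)) (h : ∀ perm ∈ l, perm.Nodup) :
    ((l.flatMap (fun perm => (orderedPairsB perm).map (fun k => (k, perm)))).filter
        (fun p => p.1 == c)).map (fun p => p.2)
      = l.filter (fun perm => (orderedPairsB perm).contains c) := by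
  induction l with
  | nil => rfl
  | cons perm rest ih =>
    simp only [List.flatMap_cons, List.filter_append, List.map_append, List.filter_map,
      List.map_map, List.filter_cons]
    have hpairs : (orderedPairsB perm).Nodup := nodup_orderedPairs perm (h perm (by simp))
    have hfilter : (orderedPairsB perm).filter
        ((fun p => p.1 == c) ∘ (fun k => (k, perm))) = (orderedPairsB perm).filter (· == c) :=
      List.filter_congr (fun k _ => rfl)
    rw [hfilter, filter_beq_nodup _ hpairs c]
    have ihrest := ih (fun q hq => h q (by simp [hq]))
    by_cases hmem : c ∈ orderedPairsB perm
    · have hc : (orderedPairsB perm).contains c = true := by simpa using hmem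
      simp [hmem, ihrest]
    · have hc : (orderedPairsB perm).contains c = false := by simpa using hmem
      simp [hmem, ihrest]

lemma filter_pair_singleton (i j : Int) (xs : List Int) (h : xs.Nodup)
    (hj : j ∈ xs) (hi : i ∉ xs) :
    xs.filter (fun item => [i, j].contains item) = [j] := by
  induction xs with
  | nil => cases hj
  | cons x rest ih =>
    simp only [List.nodup_cons] at h
    simp only [List.mem_cons, not_or] at hi
    rw [List.filter_cons]
    by_cases hxj : x = j
    · subst hxj
      have hrest : rest.filter (fun item => [i, x].contains item) = [] := by
        rw [List.filter_eq_nil_iff]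
        intro a ha
        have hai : a ≠ i := fun haa => hi.2 (haa ▸ ha)
        have hax : a ≠ x := fun haa => h.1 (haa ▸ ha)
        simp [hai, hax]
      have hcx : ([i, x].contains x) = true := by simp
      rw [hcx, if_pos rfl, hrest]
    · have hxi : x ≠ i := fun haa => hi.1 haa.symm
      have hc : ([i, j].contains x) = false := by simp [hxi, hxj]
      rw [hc]
      simp only [Bool.false_eq_true, if_false]
      have hj' : j ∈ rest := by
        rcases List.mem_cons.mp hj with rfl | hj'
        · exact absurd rfl hxj
        · exact hj'
      exact ih h.2 hj' hi.2

lemma filterTwo (i j : Int) (hij : i ≠ j) (l : List Int) (h : l.Nodup)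
    (hi : i ∈ l) (hj : j ∈ l) :
    ([i, j] == l.filter (fun item => [i, j].contains item)) = decide ([i, j].Sublist l) := by
  induction l with
  | nil => cases hi
  | cons x rest ih =>
    simp only [List.nodup_cons] at h
    rw [List.filter_cons]
    by_cases hxi : x = i
    · subst hxi
      have hjrest : j ∈ rest := by
        rcases List.mem_cons.mp hj with rfl | hj'
        · exact absurd rfl hij
        · exact hj'
      have hfil : rest.filter (fun item => [x, j].contains item) = [j] :=
        filter_pair_singleton x j rest h.2 hjrest h.1
      have hsub : [x, j].Sublist (x :: rest) :=
        List.cons_sublist_cons.mpr (List.singleton_sublist.mpr hjrest)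
      have hcx : ([x, j].contains x) = true := by simp
      rw [hcx, if_pos rfl, hfil]
      simp [hsub]
    · by_cases hxj : x = j
      · subst hxj
        have hnsub : ¬ [i, x].Sublist (x :: rest) := by
          rw [List.sublist_cons_iff]
          rintro (hs | ⟨r, hr, hrs⟩)
          · exact h.1 (hs.subset (by simp))
          · injection hr with h1 _
            exact hxi h1.symm
        have hcx : ([i, x].contains x) = true := by simp
        rw [hcx, if_pos rfl]
        have hne : ([i, x] == x :: rest.filter (fun item => [i, x].contains item)) = false := by
          rw [beq_eq_false_iff_ne]
          intro heq
          injection heq with h1 _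
          exact hxi h1.symm
        rw [hne, decide_eq_false hnsub]
      · have hirest : i ∈ rest := by
          rcases List.mem_cons.mp hi with rfl | hi'
          · exact absurd rfl (Ne.symm hxi)
          · exact hi'
        have hjrest : j ∈ rest := by
          rcases List.mem_cons.mp hj with rfl | hj'
          · exact absurd rfl (Ne.symm hxj)
          · exact hj'
        have hnc : ([i, j].contains x) = false := by simp [hxi, hxj]
        have hsubeq : [i, j].Sublist (x :: rest) ↔ [i, j].Sublist rest := by
          rw [List.sublist_cons_iff]
          constructor
          · rintro (hs | ⟨r, hr, _⟩)
            · exact hs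
            · injection hr with h1 _
              exact absurd h1.symm hxi
          · exact Or.inl
        rw [hnc]
        simp only [Bool.false_eq_true, if_false]
        rw [ih h.2 hirest hjrest]
        simp [hsubeq]

lemma bucket_eq (n : Int) (i j : Int)
    (hi : i ∈ PySem.List.pyRange 0 n 1) (hj : j ∈ PySem.List.pyRange 0 n 1)
    (hij : i ≠ j) :
    (bucketsB n).getD (i, j) [] =
      (PySem.List.permutations (PySem.List.pyRange 0 n 1)
        (PySem.List.pyRange 0 n 1).length).filter
        (fun perm => [i, j] == perm.filter (fun item => [i, j].contains item)) := by
  have hnodup : ∀ perm ∈ PySem.List.permutations (PySem.List.pyRange 0 n 1)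
      (PySem.List.pyRange 0 n 1).length, perm.Nodup := by
    intro perm hperm
    exact ((PySem.List.perm_of_mem_permutations hperm).nodup_iff).mpr
      (PySem.List.nodup_pyRange_one 0 n)
  unfold bucketsB
  rw [foldl_nested_eq_flat, PySem.Dict.getD_foldl_modify_append, PySem.Dict.getD_empty,
    List.nil_append, flat_filter_map _ _ hnodup]
  apply List.filter_congr
  intro perm hperm
  have hi' : i ∈ perm := ((PySem.List.perm_of_mem_permutations hperm).mem_iff).mpr hi
  have hj' : j ∈ perm := ((PySem.List.perm_of_mem_permutations hperm).mem_iff).mpr hj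
  rw [filterTwo i j hij perm (hnodup perm hperm) hi' hj']
  have : (i, j) ∈ orderedPairsB perm ↔ [i, j].Sublist perm := mem_orderedPairs i j perm
  simp [this]

-- ===== VERDICT (by name: the statement is the Claim_ definition above) =====
theorem def_condorcet_matrix_spec : Claim_equal_def_condorcet_matrix := by
  intro election_name numcands hdom hpre
  unfold Spec_def_condorcet_matrix def_condorcet_matrix def_condorcet_matrix_alt
  apply PySem.List.foldl_congr_mem
  intro acc i hi
  apply PySem.List.foldl_congr_mem
  intro acc2 j hj
  by_cases hij : i == j
  · simp [hij]
  · simp only [hij, Bool.false_eq_true, if_false]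
    have hne : i ≠ j := by simpa using hij
    have hb := bucket_eq numcands i j hi hj hne
    unfold pairbeatsA tGeneratePermutationsWithOrder
    simp only
    rw [hb]
    rfl
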